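-- pv_equiv track=rewrite | github.com/delgaka/webcarto | src/webcarto/reputation.py | consolidate_verdict
-- ===== SOURCE A (Python) =====
-- from typing import Dict, Any, Iterable, Optional, Tuple, List
--
-- def consolidate_verdict(provider_data: Dict[str, Any]) -> str:
--     """Pega um map de provider->data e retorna o pior veredicto consolidado.
--     Ordem: malicious > suspicious > clean > unknown.
--     """
--     order = {"malicious": 3, "suspicious": 2, "clean": 1, "unknown": 0}
--     best = ("unknown", 0)
--     for v in provider_data.values():
--         ver = str(v.get("verdict", "unknown")).lower()
--         sc = order.get(ver, 0)
--         if sc > best[1]: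
--             best = (ver, sc)
--     return best[0]
-- ===== SOURCE B (Python) =====
-- def consolidate_verdict(provider_data):
--     """Worst consolidated verdict, by priority ladder over the set of seen verdicts."""
--     seen = {str(v.get("verdict", "unknown")).lower() for v in provider_data.values()}
--     for level in ("malicious", "suspicious", "clean"):
--         if level in seen:
--             return level
--     return "unknown"
-- ===== Notes on version B (the rewrite author's own statement) =====
-- stated objective: idiomatic
-- what changed: Replaces the running-maximum scan with a (verdict, score) accumulator by building the set of lowercased verdicts once and returning the first rung of the fixed priority ladder present in it.
import Mathlib
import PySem

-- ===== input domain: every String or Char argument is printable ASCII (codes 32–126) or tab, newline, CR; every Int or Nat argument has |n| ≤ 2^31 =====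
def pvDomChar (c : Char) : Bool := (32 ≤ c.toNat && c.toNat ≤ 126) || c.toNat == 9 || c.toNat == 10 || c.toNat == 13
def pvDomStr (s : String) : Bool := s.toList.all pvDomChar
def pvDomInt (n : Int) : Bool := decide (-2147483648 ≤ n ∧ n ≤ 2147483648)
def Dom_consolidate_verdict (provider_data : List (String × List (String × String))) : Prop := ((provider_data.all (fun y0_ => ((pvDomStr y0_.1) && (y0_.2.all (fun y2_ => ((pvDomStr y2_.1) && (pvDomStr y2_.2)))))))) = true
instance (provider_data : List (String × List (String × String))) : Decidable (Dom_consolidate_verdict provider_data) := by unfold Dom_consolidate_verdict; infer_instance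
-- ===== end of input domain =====

-- B replaces A's running-maximum (verdict, score) scan by a set of seen verdicts plus a
-- first-hit walk down the fixed priority ladder (idiomatic; same O(n) cost).


-- ===== PORT A =====
-- the literal dict 'order'
def pvOrder : PySem.Dict String Int :=
  PySem.Dict.mk [("malicious", 3), ("suspicious", 2), ("clean", 1), ("unknown", 0)]

def consolidate_verdict (provider_data : List (String × List (String × String))) : String :=
  (provider_data.foldl
    (fun (best : String × Int) v =>
      let ver := PySem.Str.lower (PySem.Dict.getD (PySem.Dict.mk v.2) "verdict" "unknown")
      let sc := PySem.Dict.getD pvOrder ver 0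
      if sc > best.2 then (ver, sc) else best)
    ("unknown", 0)).1

-- ===== PORT B =====
def consolidate_verdict_alt (provider_data : List (String × List (String × String))) : String :=
  let seen : PySem.Set String :=
    PySem.Set.ofList (provider_data.map
      (fun v => PySem.Str.lower (PySem.Dict.getD (PySem.Dict.mk v.2) "verdict" "unknown")))
  if PySem.Set.contains seen "malicious" then "malicious"
  else if PySem.Set.contains seen "suspicious" then "suspicious"
  else if PySem.Set.contains seen "clean" then "clean"
  else "unknown"

-- ===== PRECONDITION & SPEC =====
def Spec_consolidate_verdict (provider_data : List (String × List (String × String))) (out : String) : Prop := out = consolidate_verdict_alt provider_data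
instance (provider_data : List (String × List (String × String))) (out : String) : Decidable (Spec_consolidate_verdict provider_data out) := by unfold Spec_consolidate_verdict; infer_instance

-- ===== CLAIM (what is proved, stated in full; the proofs are below) =====
def Claim_equal_consolidate_verdict : Prop := ∀ (provider_data : List (String × List (String × String))), Dom_consolidate_verdict provider_data → Spec_consolidate_verdict provider_data (consolidate_verdict provider_data)

-- ===== LEMMAS AND PROOFS =====

-- A's loop body, over the already-lowered verdict string
def pvStep (best : String × Int) (x : String) : String × Int :=
  if PySem.Dict.getD pvOrder x 0 > best.2 then (x, PySem.Dict.getD pvOrder x 0) else best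

-- the four states A's accumulator can be in
def pvInv (b : String × Int) : Prop :=
  b = ("unknown", 0) ∨ b = ("clean", 1) ∨ b = ("suspicious", 2) ∨ b = ("malicious", 3)

theorem pvScore_mal : PySem.Dict.getD pvOrder "malicious" 0 = 3 := by decide
theorem pvScore_sus : PySem.Dict.getD pvOrder "suspicious" 0 = 2 := by decide
theorem pvScore_cle : PySem.Dict.getD pvOrder "clean" 0 = 1 := by decide

theorem pvScore_ne (x : String) (h1 : x ≠ "malicious") (h2 : x ≠ "suspicious")
    (h3 : x ≠ "clean") : PySem.Dict.getD pvOrder x 0 ≤ 0 := by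
  by_cases h4 : x = "unknown"
  · subst h4; decide
  · have : PySem.Dict.getD pvOrder x 0 = 0 := by
      simp [pvOrder, PySem.Dict.getD_eq_get?_getD, PySem.Dict.get?_mk_cons,
        (by simpa [eq_comm] using h1 : ¬("malicious" = x)),
        (by simpa [eq_comm] using h2 : ¬("suspicious" = x)),
        (by simpa [eq_comm] using h3 : ¬("clean" = x)),
        (by simpa [eq_comm] using h4 : ¬("unknown" = x))]
      rfl
    omega

theorem pvFold_char (ms : List String) :
    ∀ b : String × Int, pvInv b →
      (ms.foldl pvStep b).1 =
        if b.2 < 3 ∧ "malicious" ∈ ms then "malicious"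
        else if b.2 < 2 ∧ "suspicious" ∈ ms then "suspicious"
        else if b.2 < 1 ∧ "clean" ∈ ms then "clean"
        else b.1 := by
  induction ms with
  | nil => intro b _; simp
  | cons x xs ih =>
    intro b hb
    rw [List.foldl_cons]
    by_cases hm : x = "malicious"
    · subst hm
      rcases hb with h | h | h | h <;> subst h <;>
        simp [pvStep, pvScore_mal] <;>
        rw [ih ("malicious", 3) (by simp [pvInv])] <;> simp
    · by_cases hs : x = "suspicious"
      · subst hs
        rcases hb with h | h | h | h <;> subst h
        · simp [pvStep, pvScore_sus]
          rw [ih ("suspicious", 2) (by simp [pvInv])]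
          by_cases hM : "malicious" ∈ xs <;> simp [hM]
        · simp [pvStep, pvScore_sus]
          rw [ih ("suspicious", 2) (by simp [pvInv])]
          by_cases hM : "malicious" ∈ xs <;> simp [hM]
        · simp [pvStep, pvScore_sus]
          rw [ih ("suspicious", 2) (by simp [pvInv])]
          by_cases hM : "malicious" ∈ xs <;> simp [hM]
        · simp [pvStep, pvScore_sus]
          rw [ih ("malicious", 3) (by simp [pvInv])]
          simp
      · by_cases hc : x = "clean"
        · subst hc
          rcases hb with h | h | h | h <;> subst h
          · simp [pvStep, pvScore_cle]
            rw [ih ("clean", 1) (by simp [pvInv])]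
            by_cases hM : "malicious" ∈ xs <;> by_cases hS : "suspicious" ∈ xs <;>
              simp [hM, hS]
          · simp [pvStep, pvScore_cle]
            rw [ih ("clean", 1) (by simp [pvInv])]
            by_cases hM : "malicious" ∈ xs <;> by_cases hS : "suspicious" ∈ xs <;>
              simp [hM, hS]
          · simp [pvStep, pvScore_cle]
            rw [ih ("suspicious", 2) (by simp [pvInv])]
            by_cases hM : "malicious" ∈ xs <;> simp [hM]
          · simp [pvStep, pvScore_cle]
            rw [ih ("malicious", 3) (by simp [pvInv])]
            simp
        · have hx : PySem.Dict.getD pvOrder x 0 ≤ 0 := pvScore_ne x hm hs hc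
          have hstep : pvStep b x = b := by
            rcases hb with h | h | h | h <;> subst h <;> simp [pvStep] <;> omega
          rw [hstep, ih b hb]
          simp [Ne.symm hm, Ne.symm hs, Ne.symm hc]

-- ===== VERDICT (by name: the statement is the Claim_ definition above) =====
theorem consolidate_verdict_spec : Claim_equal_consolidate_verdict := by
  intro pd _
  unfold Spec_consolidate_verdict consolidate_verdict consolidate_verdict_alt
  have h1 : pd.foldl
      (fun (best : String × Int) v =>
        let ver := PySem.Str.lower (PySem.Dict.getD (PySem.Dict.mk v.2) "verdict" "unknown")
        let sc := PySem.Dict.getD pvOrder ver 0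
        if sc > best.2 then (ver, sc) else best) ("unknown", 0)
      = (pd.map (fun v => PySem.Str.lower (PySem.Dict.getD (PySem.Dict.mk v.2) "verdict" "unknown"))).foldl
          pvStep ("unknown", 0) := by rw [List.foldl_map]; rfl
  rw [h1, pvFold_char _ ("unknown", 0) (Or.inl rfl)]
  set ms := pd.map (fun v => PySem.Str.lower (PySem.Dict.getD (PySem.Dict.mk v.2) "verdict" "unknown")) with hms
  by_cases hM : "malicious" ∈ ms <;> by_cases hS : "suspicious" ∈ ms <;>
    by_cases hC : "clean" ∈ ms <;>
    simp [hM, hS, hC, PySem.Set.contains, PySem.Set.mem_ofList]
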